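-- pv_equiv track=rewrite | github.com/vbontoux/impressionnistes | functions/shared/boat_registration_utils.py | detect_multi_club_crew
-- ===== SOURCE A (Python) =====
-- from typing import List, Dict, Any, Optional
--
-- def detect_multi_club_crew(crew_members: List[Dict[str, Any]]) -> bool:
--     """
--     Detect if a crew contains members from multiple clubs
--
--     Args:
--         crew_members: List of crew member objects with club_affiliation
--
--     Returns:
--         True if crew has members from multiple clubs
--     """
--     if not crew_members:
--         return False
--
--     clubs = set()
--     for member in crew_members:
--         club = member.get('club_affiliation', '').upper()
--         if club:
--             clubs.add(club)
--
--     return len(clubs) > 1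
-- ===== SOURCE B (Python) =====
-- from typing import List, Dict, Any
--
-- def detect_multi_club_crew(crew_members: List[Dict[str, Any]]) -> bool:
--     first = None
--     for member in crew_members:
--         club = member.get('club_affiliation', '').upper()
--         if not club:
--             continue
--         if first is None:
--             first = club
--         elif club != first:
--             return True
--     return False
-- ===== Notes on version B (the rewrite author's own statement) =====
-- stated objective: simpler
-- what changed: Replaces the collect-all-distinct-clubs-into-a-set-then-compare-size strategy with an early-exit scan that keeps only the first non-empty club seen and returns True as soon as a different one appears.
import Mathlib
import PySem

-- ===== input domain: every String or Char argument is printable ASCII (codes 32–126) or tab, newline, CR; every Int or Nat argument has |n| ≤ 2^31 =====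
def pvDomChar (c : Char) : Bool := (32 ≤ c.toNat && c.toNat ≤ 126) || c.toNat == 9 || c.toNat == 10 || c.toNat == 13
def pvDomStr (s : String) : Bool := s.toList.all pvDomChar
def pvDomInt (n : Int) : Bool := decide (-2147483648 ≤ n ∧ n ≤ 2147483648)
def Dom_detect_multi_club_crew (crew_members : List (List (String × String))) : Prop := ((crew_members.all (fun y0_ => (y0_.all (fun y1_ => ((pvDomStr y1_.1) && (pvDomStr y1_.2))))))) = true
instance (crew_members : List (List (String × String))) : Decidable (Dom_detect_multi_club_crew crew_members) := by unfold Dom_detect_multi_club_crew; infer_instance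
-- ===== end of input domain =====

-- B replaces A's "collect all distinct non-empty uppercased clubs into a set, then test size > 1"
-- with an early-exit scan keeping only the first non-empty club seen (objective: simpler).


-- ===== PORT A =====
-- member.get('club_affiliation', '').upper()  (the same expression appears in both Pythons)
def clubOf (member : List (String × String)) : String :=
  PySem.Str.upper (PySem.Dict.getD (PySem.Dict.mk member) "club_affiliation" "")

-- A's loop: 'clubs = set(); for member in crew_members: … if club: clubs.add(club)'
def collectClubs (clubs : PySem.Set String) (cm : List (List (String × String))) : PySem.Set String :=
  cm.foldl (fun s member =>
    let club := clubOf member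
    if club ≠ "" then PySem.Set.add s club else s) clubs

def detect_multi_club_crew (crew_members : List (List (String × String))) : Bool :=
  if crew_members = [] then false
  else decide (1 < PySem.Set.len (collectClubs PySem.Set.empty crew_members))

-- ===== PORT B =====
-- B's loop: `first` is the first non-empty club seen so far; early return True on a mismatch
def scanClubs : Option String → List (List (String × String)) → Bool
  | _, [] => false
  | first, member :: rest =>
    let club := clubOf member
    if club = "" then scanClubs first rest
    else
      match first with
      | none => scanClubs (some club) rest
      | some f => if club ≠ f then true else scanClubs (some f) rest

def detect_multi_club_crew_alt (crew_members : List (List (String × String))) : Bool :=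
  scanClubs none crew_members

-- ===== PRECONDITION & SPEC =====
def Spec_detect_multi_club_crew (crew_members : List (List (String × String))) (out : Bool) : Prop := out = detect_multi_club_crew_alt crew_members
instance (crew_members : List (List (String × String))) (out : Bool) : Decidable (Spec_detect_multi_club_crew crew_members out) := by unfold Spec_detect_multi_club_crew; infer_instance

-- ===== CLAIM (what is proved, stated in full; the proofs are below) =====
def Claim_equal_detect_multi_club_crew : Prop := ∀ (crew_members : List (List (String × String))), Dom_detect_multi_club_crew crew_members → Spec_detect_multi_club_crew crew_members (detect_multi_club_crew crew_members)

-- ===== LEMMAS AND PROOFS =====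

-- A's loop only ever appends to the set, so its length never decreases
lemma length_collectClubs_ge (cm : List (List (String × String))) :
    ∀ s : PySem.Set String, s.length ≤ (collectClubs s cm).length := by
  induction cm with
  | nil => intro s; simp [collectClubs]
  | cons m rest ih =>
    intro s
    simp only [collectClubs, List.foldl_cons]
    refine le_trans ?_ (ih _)
    by_cases h : clubOf m = ""
    · simp [h]
    · simp only [h, PySem.Set.add, ne_eq, not_false_iff, if_pos]
      split <;> simp

-- the scan with state `first` computes "the final set has more than one element",
-- provided `first` and the set `s` agree (both empty, or s = [the first club])
lemma scanClubs_eq (cm : List (List (String × String))) :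
    ∀ (first : Option String) (s : PySem.Set String),
      (first = none ∧ s = []) ∨ (∃ f, first = some f ∧ s = [f]) →
      scanClubs first cm = decide (1 < (collectClubs s cm).length) := by
  induction cm with
  | nil =>
    intro first s h
    rcases h with ⟨h1, h2⟩ | ⟨f, h1, h2⟩ <;> subst h1 <;> subst h2 <;>
      simp [scanClubs, collectClubs]
  | cons m rest ih =>
    intro first s h
    simp only [scanClubs, collectClubs, List.foldl_cons]
    by_cases hc : clubOf m = ""
    · rw [if_pos hc]
      simp only [if_neg (show ¬ clubOf m ≠ "" by simp [hc])]
      exact ih first s h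
    · rw [if_neg hc]
      simp only [if_pos (show clubOf m ≠ "" from hc)]
      rcases h with ⟨h1, h2⟩ | ⟨f, h1, h2⟩
      · subst h1; subst h2
        have hadd : PySem.Set.add ([] : PySem.Set String) (clubOf m) = [clubOf m] := by
          simp [PySem.Set.add, PySem.Set.contains]
        simp only [hadd]
        exact ih (some (clubOf m)) [clubOf m] (Or.inr ⟨_, rfl, rfl⟩)
      · subst h1; subst h2
        by_cases hf : clubOf m = f
        · subst hf
          have hadd : PySem.Set.add [clubOf m] (clubOf m) = [clubOf m] := by
            simp [PySem.Set.add, PySem.Set.contains]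
          simp only [hadd]
          show (if clubOf m ≠ clubOf m then true else scanClubs (some (clubOf m)) rest) = _
          rw [if_neg (by simp)]
          exact ih (some (clubOf m)) [clubOf m] (Or.inr ⟨_, rfl, rfl⟩)
        · show (if clubOf m ≠ f then true else scanClubs (some f) rest) = _
          rw [if_pos hf]
          have hadd : PySem.Set.add [f] (clubOf m) = [f, clubOf m] := by
            simp [PySem.Set.add, PySem.Set.contains, hf]
          simp only [hadd]
          have h2 := length_collectClubs_ge rest [f, clubOf m]
          simp only [collectClubs, List.length_cons, List.length_nil] at h2
          symm
          simp only [decide_eq_true_eq]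
          omega

-- Set.len is the Int-cast list length
lemma set_len_eq (s : PySem.Set String) : PySem.Set.len s = (s.length : Int) := by
  simp [PySem.Set.len]

-- ===== VERDICT (by name: the statement is the Claim_ definition above) =====
theorem detect_multi_club_crew_spec : Claim_equal_detect_multi_club_crew := by
  intro cm _
  show detect_multi_club_crew cm = detect_multi_club_crew_alt cm
  unfold detect_multi_club_crew detect_multi_club_crew_alt
  cases cm with
  | nil => simp [scanClubs]
  | cons m rest =>
    rw [if_neg (by simp)]
    rw [scanClubs_eq (m :: rest) none [] (Or.inl ⟨rfl, rfl⟩), set_len_eq]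
    simp
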